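-- pv_equiv track=rewrite | github.com/ltdt-apex/codeforces | question/others/td_120.py | findDistinctSubarrays
-- ===== SOURCE A (Python) =====
-- from typing import List, Set, Tuple
-- from collections import defaultdict
--
-- def findDistinctSubarrays(nums: List[int]) -> Set[Tuple[int]]:
--     s = set()
--
--     d = defaultdict(int)
--
--     l = 0
--     for r in range(len(nums)):
--         if d[nums[r]] == 1:
--             s.add(tuple(nums[l:r]))
--         d[nums[r]] += 1
--         while d[nums[r]] > 1:
--             d[nums[l]] -= 1
--             l+=1
--
--     if len(nums)!=0:
--         s.add(tuple(nums[l:]))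
--     return s
-- ===== SOURCE B (Python) =====
-- from typing import List, Set, Tuple
--
-- def findDistinctSubarrays(nums: List[int]) -> Set[Tuple[int]]:
--     s = set()
--     last = {}
--     l = 0
--     for r, v in enumerate(nums):
--         j = last.get(v, -1)
--         if j >= l:
--             s.add(tuple(nums[l:r]))
--             l = j + 1
--         last[v] = r
--     if nums:
--         s.add(tuple(nums[l:]))
--     return s
-- ===== Notes on version B (the rewrite author's own statement) =====
-- stated objective: faster
-- what changed: B replaces A's count-dict plus inner while-loop shrink with a dict of last-seen indices and a direct jump l = last[v] + 1, eliminating the inner loop.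
import Mathlib
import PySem

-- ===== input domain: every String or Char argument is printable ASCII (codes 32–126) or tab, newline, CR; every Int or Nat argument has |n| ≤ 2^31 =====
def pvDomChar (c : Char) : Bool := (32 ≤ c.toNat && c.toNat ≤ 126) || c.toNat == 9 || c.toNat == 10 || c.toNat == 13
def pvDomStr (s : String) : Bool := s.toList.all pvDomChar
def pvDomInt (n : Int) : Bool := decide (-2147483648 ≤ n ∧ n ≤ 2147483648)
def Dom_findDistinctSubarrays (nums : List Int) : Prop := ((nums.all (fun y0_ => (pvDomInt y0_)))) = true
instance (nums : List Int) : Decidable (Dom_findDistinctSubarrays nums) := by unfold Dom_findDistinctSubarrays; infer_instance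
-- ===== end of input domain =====

-- B replaces A's count-dict + inner while-loop shrink by a last-seen-index dict with a direct
-- jump of the left boundary (no inner loop); objective: more idiomatic sliding window.

-- ===== PORT A =====
-- inner loop 'while d[nums[r]] > 1: d[nums[l]] -= 1; l += 1', as fuel-bounded recursion.
-- fuel = len(nums) always suffices (l strictly increases and stays ≤ r while the condition holds),
-- so the fuel-exhausted branch is unreachable; a defaultdict read d[k] is getD d k 0 (the key
-- insertion a defaultdict read performs is value-invisible: d is only ever read via d[k]).
def pvShrinkA (nums : List Int) (v : Int) : Nat → PySem.Dict Int Int × Int → PySem.Dict Int Int × Int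
  | 0, st => st
  | fuel+1, (d, l) =>
    if 1 < d.getD v 0 then
      -- nums[l] is always in range when the condition holds (a duplicate lies in the window)
      pvShrinkA nums v fuel
        (d.insert (PySem.List.pyGetD nums l 0) (d.getD (PySem.List.pyGetD nums l 0) 0 - 1), l + 1)
    else (d, l)

-- body of 'for r in range(len(nums))'
def pvStepA (nums : List Int) (st : List (List Int) × PySem.Dict Int Int × Int) (r : Int) :
    List (List Int) × PySem.Dict Int Int × Int :=
  let s := st.1
  let d := st.2.1
  let l := st.2.2
  let v := PySem.List.pyGetD nums r 0
  let s := if d.getD v 0 == 1 then PySem.Set.add s (PySem.List.slice nums (some l) (some r)) else s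
  let d := d.insert v (d.getD v 0 + 1)
  let dl := pvShrinkA nums v nums.length (d, l)
  (s, dl.1, dl.2)

def findDistinctSubarrays (nums : List Int) : List (List Int) :=
  let st := (PySem.List.pyRange 0 (nums.length : Int) 1).foldl (pvStepA nums) ([], PySem.Dict.empty, 0)
  if nums.length ≠ 0 then PySem.Set.add st.1 (PySem.List.slice nums (some st.2.2) none) else st.1

-- ===== PORT B =====
-- body of 'for r, v in enumerate(nums)'
def pvStepB (nums : List Int) (st : List (List Int) × PySem.Dict Int Int × Int) (rv : Int × Int) :
    List (List Int) × PySem.Dict Int Int × Int :=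
  let s := st.1
  let last := st.2.1
  let l := st.2.2
  let j := last.getD rv.2 (-1)
  let sl := if l ≤ j then (PySem.Set.add s (PySem.List.slice nums (some l) (some rv.1)), j + 1)
            else (s, l)
  (sl.1, last.insert rv.2 rv.1, sl.2)

def findDistinctSubarrays_alt (nums : List Int) : List (List Int) :=
  let st := (PySem.List.enumerate nums 0).foldl (pvStepB nums) ([], PySem.Dict.empty, 0)
  if nums ≠ [] then PySem.Set.add st.1 (PySem.List.slice nums (some st.2.2) none) else st.1

-- ===== PRECONDITION & SPEC =====
def Spec_findDistinctSubarrays (nums : List Int) (out : List (List Int)) : Prop := out = findDistinctSubarrays_alt nums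
instance (nums : List Int) (out : List (List Int)) : Decidable (Spec_findDistinctSubarrays nums out) := by unfold Spec_findDistinctSubarrays; infer_instance

-- ===== CLAIM (what is proved, stated in full; the proofs are below) =====
def Claim_equal_findDistinctSubarrays : Prop := ∀ (nums : List Int), Dom_findDistinctSubarrays nums → Spec_findDistinctSubarrays nums (findDistinctSubarrays nums)

-- ===== LEMMAS AND PROOFS =====


-- index of the last occurrence of w in nums[:r] (-1 if none)
def pvLastIdx (nums : List Int) : Nat → Int → Int
  | 0, _ => -1
  | r+1, w => if nums[r]? = some w then (r : Int) else pvLastIdx nums r w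


theorem pvLastIdx_ge_iff (nums : List Int) (r L : Nat) (w : Int) :
    (L : Int) ≤ pvLastIdx nums r w ↔ ∃ i, L ≤ i ∧ i < r ∧ nums[i]? = some w := by
  induction r with
  | zero => simp [pvLastIdx]; omega
  | succ r ih =>
    simp only [pvLastIdx]
    split
    · rename_i h
      constructor
      · intro hle
        exact ⟨r, by exact_mod_cast hle, by omega, h⟩
      · rintro ⟨i, hLi, hir, hi⟩
        exact_mod_cast Nat.cast_le.2 (by omega : L ≤ r)
    · rename_i h
      rw [ih]
      constructor
      · rintro ⟨i, hLi, hir, hi⟩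
        exact ⟨i, hLi, by omega, hi⟩
      · rintro ⟨i, hLi, hir, hi⟩
        refine ⟨i, hLi, ?_, hi⟩
        rcases Nat.lt_succ_iff_lt_or_eq.1 hir with h2 | h2
        · exact h2
        · subst h2; exact absurd hi h

theorem pvLastIdx_nat (nums : List Int) (r : Nat) (w : Int) (h : 0 ≤ pvLastIdx nums r w) :
    ∃ j : Nat, pvLastIdx nums r w = (j : Int) ∧ j < r ∧ nums[j]? = some w ∧
      ∀ i, j < i → i < r → nums[i]? ≠ some w := by
  induction r with
  | zero => simp [pvLastIdx] at h
  | succ r ih =>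
    simp only [pvLastIdx] at h ⊢
    split
    · rename_i hr
      exact ⟨r, rfl, by omega, hr, fun i h1 h2 => absurd h1 (by omega)⟩
    · rename_i hr
      rw [if_neg hr] at h
      obtain ⟨j, hj, hjr, hjw, hafter⟩ := ih h
      refine ⟨j, hj, by omega, hjw, fun i h1 h2 => ?_⟩
      rcases Nat.lt_succ_iff_lt_or_eq.1 h2 with h3 | h3
      · exact hafter i h1 h3
      · subst h3; exact hr

theorem pvMemSeg (nums : List Int) (r L : Nat) (hr : r ≤ nums.length) (w : Int) :
    w ∈ (nums.take r).drop L ↔ ∃ i, L ≤ i ∧ i < r ∧ nums[i]? = some w := by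
  rw [List.mem_iff_getElem]
  have hlen : ((nums.take r).drop L).length = r - L := by simp; omega
  constructor
  · rintro ⟨k, hk, hkw⟩
    refine ⟨L + k, by omega, by omega, ?_⟩
    rw [List.getElem_drop, List.getElem_take] at hkw
    rw [List.getElem?_eq_getElem (by omega)]
    exact congrArg some hkw
  · rintro ⟨i, hLi, hir, hi⟩
    refine ⟨i - L, by omega, ?_⟩
    rw [List.getElem_drop, List.getElem_take]
    rw [List.getElem?_eq_getElem (by omega : i < nums.length)] at hi
    have h2 : nums[i] = w := Option.some.inj hi
    have h3 : L + (i - L) = i := by omega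
    simp only [h3]
    exact h2

theorem pvSegSucc (nums : List Int) (r L : Nat) (hL : L ≤ r) (hr : r < nums.length) :
    (nums.take (r+1)).drop L = (nums.take r).drop L ++ [nums[r]] := by
  rw [List.take_add_one, List.getElem?_eq_getElem hr]
  rw [List.drop_append_of_le_length (by simp; omega)]
  rfl

theorem pvShrinkA_stop (nums : List Int) (v : Int) (fuel : Nat) (d : PySem.Dict Int Int) (l : Int)
    (h : d.getD v 0 ≤ 1) : pvShrinkA nums v fuel (d, l) = (d, l) := by
  cases fuel with
  | zero => rfl
  | succ f => simp only [pvShrinkA]; rw [if_neg (by omega)]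

theorem pvShrinkA_spec (nums : List Int) (v : Int) (m j : Nat)
    (hjm : j < m) (hm : m ≤ nums.length) (hjv : nums[j]? = some v) :
    ∀ (fuel l : Nat) (d : PySem.Dict Int Int),
    l ≤ j → j + 1 - l ≤ fuel →
    (∀ i, l ≤ i → i < j → nums[i]? ≠ some v) →
    (∀ w, d.getD w 0 = (((nums.take m).drop l).count w : Int)) →
    ((nums.take m).drop l).count v = 2 →
    ∃ d' : PySem.Dict Int Int,
      pvShrinkA nums v fuel (d, (l : Int)) = (d', ((j+1 : Nat) : Int)) ∧
      (∀ w, d'.getD w 0 = (((nums.take m).drop (j+1)).count w : Int)) := by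
  intro fuel
  induction fuel with
  | zero => intro l d hlj hfuel; omega
  | succ f ih =>
    intro l d hlj hfuel hbefore hcount hcv
    have hlm : l < m := by omega
    have hln : l < nums.length := by omega
    -- the window splits as nums[l] :: rest
    have hsplit : (nums.take m).drop l = nums[l] :: (nums.take m).drop (l+1) := by
      rw [List.drop_eq_getElem_cons (by simp; omega)]
      simp [List.getElem_take]
    have hget : PySem.List.pyGetD nums (l : Int) 0 = nums[l] := by
      rw [PySem.List.pyGetD_natCast, List.getD_eq_getElem?_getD, List.getElem?_eq_getElem hln]
      rfl
    have hcond : 1 < d.getD v 0 := by rw [hcount v, hcv]; omega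
    simp only [pvShrinkA, if_pos hcond, hget]
    have hcnt' : ∀ w, (d.insert nums[l] (d.getD nums[l] 0 - 1)).getD w 0 =
        (((nums.take m).drop (l+1)).count w : Int) := by
      intro w
      rw [PySem.Dict.getD_insert]
      by_cases hw : w = nums[l]
      · subst hw
        rw [if_pos rfl, hcount, hsplit, List.count_cons_self]
        push_cast; ring
      · rw [if_neg hw, hcount, hsplit, List.count_cons_of_ne (by exact fun h => hw h.symm)]
    by_cases hcase : l = j
    · -- nums[l] = v : after this step count v = 1, loop stops
      subst hcase
      have hlv : nums[l] = v := by
        rw [List.getElem?_eq_getElem hln] at hjv; exact Option.some.inj hjv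
      have hrest : ((nums.take m).drop (l+1)).count v = 1 := by
        rw [hsplit, hlv, List.count_cons_self] at hcv
        omega
      refine ⟨d.insert nums[l] (d.getD nums[l] 0 - 1), ?_, hcnt'⟩
      have hc1 : (d.insert nums[l] (d.getD nums[l] 0 - 1)).getD v 0 ≤ 1 := by
        rw [hcnt' v, hrest]
        norm_num
      have heq : ((l : Int) + 1) = ((l + 1 : Nat) : Int) := by push_cast; ring
      rw [heq, pvShrinkA_stop _ _ _ _ _ hc1]
    · -- nums[l] ≠ v : recurse
      have hlv : nums[l]? ≠ some v := hbefore l le_rfl (by omega)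
      have hne : nums[l] ≠ v := by
        rw [List.getElem?_eq_getElem hln] at hlv
        exact fun h => hlv (congrArg some h)
      have hcv' : ((nums.take m).drop (l+1)).count v = 2 := by
        rw [hsplit, List.count_cons_of_ne hne] at hcv
        exact hcv
      have : ((l : Int) + 1) = ((l + 1 : Nat) : Int) := by push_cast; ring
      rw [this]
      exact ih (l+1) _ (by omega) (by omega)
        (fun i h1 h2 => hbefore i (by omega) h2) hcnt' hcv'

theorem pvSegUnique (nums : List Int) (r L : Nat) (hr : r ≤ nums.length)
    (hnd : ((nums.take r).drop L).Nodup) (v : Int) (i j : Nat)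
    (hLi : L ≤ i) (hir : i < r) (hLj : L ≤ j) (hjr : j < r)
    (hvi : nums[i]? = some v) (hvj : nums[j]? = some v) : i = j := by
  have hlen : ((nums.take r).drop L).length = r - L := by simp; omega
  have gi : ((nums.take r).drop L)[i - L]'(by omega) = v := by
    rw [List.getElem_drop, List.getElem_take]
    rw [List.getElem?_eq_getElem (by omega : i < nums.length)] at hvi
    have h3 : L + (i - L) = i := by omega
    simp only [h3]
    exact Option.some.inj hvi
  have gj : ((nums.take r).drop L)[j - L]'(by omega) = v := by
    rw [List.getElem_drop, List.getElem_take]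
    rw [List.getElem?_eq_getElem (by omega : j < nums.length)] at hvj
    have h3 : L + (j - L) = j := by omega
    simp only [h3]
    exact Option.some.inj hvj
  have := (List.Nodup.getElem_inj_iff hnd (hi := by omega) (hj := by omega)).1 (gi.trans gj.symm)
  omega

theorem pvLoopInv (nums : List Int) (r : Nat) (hr : r ≤ nums.length) :
    ∃ (L : Nat) (s : List (List Int)) (d last : PySem.Dict Int Int),
      (PySem.List.pyRange 0 (r : Int) 1).foldl (pvStepA nums) ([], PySem.Dict.empty, 0) = (s, d, (L : Int)) ∧
      (PySem.List.enumerate (nums.take r) 0).foldl (pvStepB nums) ([], PySem.Dict.empty, 0) = (s, last, (L : Int)) ∧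
      L ≤ r ∧
      (∀ w, d.getD w 0 = (((nums.take r).drop L).count w : Int)) ∧
      ((nums.take r).drop L).Nodup ∧
      (∀ w, last.getD w (-1) = pvLastIdx nums r w) := by
  induction r with
  | zero =>
    refine ⟨0, [], PySem.Dict.empty, PySem.Dict.empty, ?_, ?_, le_rfl, ?_, ?_, ?_⟩
    · simp only [Nat.cast_zero]
      rw [PySem.List.pyRange_one_eq_nil le_rfl]
      rfl
    · simp [PySem.List.enumerate_nil]
    · intro w; simp [PySem.Dict.getD_empty]
    · simp
    · intro w; simp [PySem.Dict.getD_empty, pvLastIdx]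
  | succ r ih =>
    have hrn : r < nums.length := by omega
    obtain ⟨L, s, d, last, hA, hB, hLr, hcount, hnd, hlast⟩ := ih (by omega)
    set v := nums[r] with hv
    -- peel the A-side range
    have hAr : (PySem.List.pyRange 0 ((r+1 : Nat) : Int) 1).foldl (pvStepA nums) ([], PySem.Dict.empty, 0)
        = pvStepA nums (s, d, (L : Int)) (r : Int) := by
      have : ((r+1 : Nat) : Int) = (r : Int) + 1 := by push_cast; ring
      rw [this, PySem.List.pyRange_one_succ_right (by positivity), List.foldl_append, hA]
      rfl
    -- peel the B-side enumerate
    have htk : nums.take (r+1) = nums.take r ++ [v] := by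
      rw [List.take_add_one, List.getElem?_eq_getElem hrn]; rfl
    have hBr : (PySem.List.enumerate (nums.take (r+1)) 0).foldl (pvStepB nums) ([], PySem.Dict.empty, 0)
        = pvStepB nums (s, last, (L : Int)) ((r : Int), v) := by
      rw [htk, PySem.List.enumerate_append, List.foldl_append, hB]
      have hlen : (nums.take r).length = r := by simp; omega
      rw [hlen]
      simp [PySem.List.enumerate_cons, PySem.List.enumerate_nil]
    have hget : PySem.List.pyGetD nums (r : Int) 0 = v := by
      rw [PySem.List.pyGetD_natCast, List.getD_eq_getElem?_getD, List.getElem?_eq_getElem hrn]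
      rfl
    have hseg1 : (nums.take (r+1)).drop L = (nums.take r).drop L ++ [v] := pvSegSucc nums r L hLr hrn
    have hrsome : nums[r]? = some v := List.getElem?_eq_getElem hrn
    by_cases hmem : v ∈ (nums.take r).drop L
    · -- duplicate enters the window
      have hcnt1 : ((nums.take r).drop L).count v = 1 := by
        have h1 := List.nodup_iff_count_le_one.1 hnd v
        have h2 := List.count_pos_iff.2 hmem
        omega
      obtain ⟨i, hLi, hir, hiv⟩ := (pvMemSeg nums r L (by omega) v).1 hmem
      have hge : (L : Int) ≤ pvLastIdx nums r v := (pvLastIdx_ge_iff nums r L v).2 ⟨i, hLi, hir, hiv⟩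
      obtain ⟨j, hjeq, hjr, hjv, hafter⟩ := pvLastIdx_nat nums r v (le_trans (by positivity) hge)
      have hLj : L ≤ j := by rw [hjeq] at hge; exact_mod_cast hge
      -- shrink: from window nums[L:r+1] (count v = 2) to nums[j+1:r+1]
      have hins : ∀ w : Int, ((d.insert v (d.getD v 0 + 1)).getD w 0)
          = (((nums.take (r+1)).drop L).count w : Int) := by
        intro w
        rw [PySem.Dict.getD_insert, hseg1, List.count_append]
        by_cases hw : w = v
        · subst hw
          rw [if_pos rfl, hcount, hcnt1]
          simp
        · rw [if_neg hw, hcount]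
          have hc : List.count w [v] = 0 := List.count_eq_zero.2 (by simpa using hw)
          rw [hc]
          push_cast
          ring
      have hcv2 : ((nums.take (r+1)).drop L).count v = 2 := by
        rw [hseg1, List.count_append, hcnt1]
        simp
      have hbef : ∀ i', L ≤ i' → i' < j → nums[i']? ≠ some v := by
        intro i' h1 h2 h3
        have := pvSegUnique nums r L (by omega) hnd v i' j h1 (by omega) hLj hjr h3 hjv
        omega
      obtain ⟨d', hshr, hd'⟩ := pvShrinkA_spec nums v (r+1) j (by omega) (by omega) hjv
        nums.length L (d.insert v (d.getD v 0 + 1)) hLj (by omega) hbef hins hcv2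
      have hAcond : (d.getD v 0 == 1) = true := by
        rw [hcount v, hcnt1]; rfl
      have hstepA : pvStepA nums (s, d, (L : Int)) (r : Int)
          = (PySem.Set.add s (PySem.List.slice nums (some (L : Int)) (some (r : Int))), d', ((j+1 : Nat) : Int)) := by
        simp only [pvStepA, hget, hAcond, if_pos]
        rw [hshr]
      have hBcond : ((L : Int) ≤ last.getD v (-1)) := by rw [hlast v]; exact hge
      have hstepB : pvStepB nums (s, last, (L : Int)) ((r : Int), v)
          = (PySem.Set.add s (PySem.List.slice nums (some (L : Int)) (some (r : Int))), last.insert v (r : Int), ((j+1 : Nat) : Int)) := by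
        have hcondB : ((L : Int) ≤ (j : Int)) := by exact_mod_cast hLj
        simp only [pvStepB, hlast v, hjeq, if_pos hcondB]
        have hcast : (j : Int) + 1 = ((j+1 : Nat) : Int) := by push_cast; ring
        rw [hcast]
      refine ⟨j+1, _, d', last.insert v (r : Int), by rw [hAr, hstepA], by rw [hBr, hstepB], by omega, hd', ?_, ?_⟩
      · -- new window nums[j+1:r+1] is distinct
        have hseg2 : (nums.take (r+1)).drop (j+1) = (nums.take r).drop (j+1) ++ [v] :=
          pvSegSucc nums r (j+1) (by omega) hrn
        have hsub : (nums.take r).drop (j+1) = ((nums.take r).drop L).drop (j+1-L) := by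
          rw [List.drop_drop]
          congr 1
          omega
        have hnd2 : ((nums.take r).drop (j+1)).Nodup := by
          rw [hsub]; exact hnd.sublist (List.drop_sublist _ _)
        have hnotv : v ∉ (nums.take r).drop (j+1) := by
          intro hmem2
          obtain ⟨i', h1, h2, h3⟩ := (pvMemSeg nums r (j+1) (by omega) v).1 hmem2
          exact hafter i' (by omega) h2 h3
        rw [hseg2]
        simp [List.nodup_append, hnd2]
        intro a ha h
        subst h
        exact hnotv ha
      · intro w
        rw [PySem.Dict.getD_insert]
        simp only [pvLastIdx, hrsome]
        by_cases hw : w = v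
        · subst hw; rw [if_pos rfl, if_pos rfl]
        · have hnv : ¬ (some v = some w) := by
            simp only [Option.some.injEq]
            omega
          rw [if_neg hw, if_neg hnv, hlast w]
    · -- new element: window just grows
      have hcnt0 : ((nums.take r).drop L).count v = 0 := List.count_eq_zero.2 hmem
      have hAcond : (d.getD v 0 == 1) = false := by
        rw [hcount v, hcnt0]; rfl
      have hd1 : (d.insert v (d.getD v 0 + 1)).getD v 0 ≤ 1 := by
        rw [PySem.Dict.getD_insert, if_pos rfl, hcount v, hcnt0]
        norm_num
      have hstepA : pvStepA nums (s, d, (L : Int)) (r : Int)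
          = (s, d.insert v (d.getD v 0 + 1), (L : Int)) := by
        simp only [pvStepA, hget, hAcond]
        rw [pvShrinkA_stop _ _ _ _ _ hd1]
        simp
      have hnlt : ¬ ((L : Int) ≤ pvLastIdx nums r v) := by
        intro hge
        obtain ⟨i, h1, h2, h3⟩ := (pvLastIdx_ge_iff nums r L v).1 hge
        exact hmem ((pvMemSeg nums r L (by omega) v).2 ⟨i, h1, h2, h3⟩)
      have hstepB : pvStepB nums (s, last, (L : Int)) ((r : Int), v)
          = (s, last.insert v (r : Int), (L : Int)) := by
        simp only [pvStepB, hlast v]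
        rw [if_neg hnlt]
      refine ⟨L, s, d.insert v (d.getD v 0 + 1), last.insert v (r : Int),
        by rw [hAr, hstepA], by rw [hBr, hstepB], by omega, ?_, ?_, ?_⟩
      · intro w
        rw [PySem.Dict.getD_insert, hseg1, List.count_append]
        by_cases hw : w = v
        · subst hw
          rw [if_pos rfl, hcount, hcnt0]
          simp
        · rw [if_neg hw, hcount]
          have hc : List.count w [v] = 0 := List.count_eq_zero.2 (by simpa using hw)
          rw [hc]
          push_cast
          ring
      · rw [hseg1]
        simp [List.nodup_append, hnd]
        intro a ha h
        subst h
        exact hmem ha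
      · intro w
        rw [PySem.Dict.getD_insert]
        simp only [pvLastIdx, hrsome]
        by_cases hw : w = v
        · subst hw; rw [if_pos rfl, if_pos rfl]
        · have hnv : ¬ (some v = some w) := by
            simp only [Option.some.injEq]
            omega
          rw [if_neg hw, if_neg hnv, hlast w]


-- ===== VERDICT (by name: the statement is the Claim_ definition above) =====
theorem findDistinctSubarrays_spec : Claim_equal_findDistinctSubarrays := by
  intro nums _
  unfold Spec_findDistinctSubarrays findDistinctSubarrays findDistinctSubarrays_alt
  obtain ⟨L, s, d, last, hA, hB, -, -, -, -⟩ := pvLoopInv nums nums.length le_rfl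
  rw [List.take_length] at hB
  rw [hA, hB]
  by_cases h : nums = []
  · subst h; rfl
  · rw [if_pos (by simpa using h), if_pos h]
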